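-- pv_equiv track=rewrite | github.com/atidem/associationRuleMining-Apriori | apriorian.py | convertToFrequency
-- ===== SOURCE A (Python) =====
-- def findDifferentValue(c):
--     sayanList = []
--     for a in range (0,len(c)):
--         if(c[a] not in sayanList and c[a]!="unKnow" ):
--             sayanList.append(c[a])
--     return sayanList
--
-- def convertToFrequency(matris):
--     stunList = findDifferentValue(matris)
--     temp = []
--     frekans = []
--     frekans.append(list(stunList))
--     for a in range(0,len(matris)):
--         for b in range(0,len(stunList)):
--             if(matris[a] == stunList[b]):
--                 temp.append("1")
--             else:
--                 temp.append("0")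
--         frekans.append(list(temp))
--         temp.clear()
--     return frekans
-- ===== SOURCE B (Python) =====
-- def convertToFrequency(matris):
--     # Column-major construction: build one indicator column per distinct value,
--     # then transpose the columns into rows.
--     header = list(dict.fromkeys(v for v in matris if v != "unKnow"))
--     cols = [["1" if v == u else "0" for v in matris] for u in header]
--     return [header] + [[col[i] for col in cols] for i in range(len(matris))]
-- ===== Notes on version B (the rewrite author's own statement) =====
-- stated objective: alternative
-- what changed: B builds the matrix column-major: one indicator column per distinct value, then transposes the columns into rows, instead of A's row-major nested scan accumulating per-row cells; the dedup is done with dict.fromkeys on a filtered generator.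
import Mathlib
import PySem

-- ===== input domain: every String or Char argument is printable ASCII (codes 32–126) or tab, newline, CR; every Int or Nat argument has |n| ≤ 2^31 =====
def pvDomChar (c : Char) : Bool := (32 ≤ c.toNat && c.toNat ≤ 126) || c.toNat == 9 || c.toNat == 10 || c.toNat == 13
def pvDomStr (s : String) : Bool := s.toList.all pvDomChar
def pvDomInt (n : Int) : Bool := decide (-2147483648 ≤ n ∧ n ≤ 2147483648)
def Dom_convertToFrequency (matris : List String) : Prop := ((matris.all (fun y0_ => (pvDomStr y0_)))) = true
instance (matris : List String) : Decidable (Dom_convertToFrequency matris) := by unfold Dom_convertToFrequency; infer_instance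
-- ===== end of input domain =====

-- B builds the matrix column-major (one indicator column per distinct value, then a transpose),
-- instead of A's row-major nested scan; same result, alternative construction.

-- ===== PORT A =====
def fdvStep (sayanList : List String) (v : String) : List String :=
  if v ∉ sayanList ∧ v ≠ "unKnow" then sayanList ++ [v] else sayanList

def findDifferentValue (c : List String) : List String :=
  (PySem.List.pyRange 0 (c.length : Int) 1).foldl
    (fun sayanList a => fdvStep sayanList (PySem.List.pyGetD c a "")) []

def rstepA (x : String) (temp : List String) (y : String) : List String :=
  if x == y then temp ++ ["1"] else temp ++ ["0"]

def rowA (stunList : List String) (x : String) : List String :=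
  (PySem.List.pyRange 0 (stunList.length : Int) 1).foldl
    (fun temp b => rstepA x temp (PySem.List.pyGetD stunList b "")) []

def cstepA (stunList : List String) (frekans : List (List String)) (x : String) : List (List String) :=
  frekans ++ [rowA stunList x]

def convertToFrequency (matris : List String) : List (List String) :=
  let stunList := findDifferentValue matris
  (PySem.List.pyRange 0 (matris.length : Int) 1).foldl
    (fun frekans a => cstepA stunList frekans (PySem.List.pyGetD matris a "")) [stunList]

-- ===== PORT B =====
def convertToFrequency_alt (matris : List String) : List (List String) :=
  let header := PySem.List.dedup (matris.filter (fun v => v ≠ "unKnow"))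
  let cols := header.map (fun u => matris.map (fun v => if v = u then "1" else "0"))
  [header] ++ (List.range matris.length).map (fun i => cols.map (fun col => col.getD i ""))

-- ===== PRECONDITION & SPEC =====
def Spec_convertToFrequency (matris : List String) (out : List (List String)) : Prop := out = convertToFrequency_alt matris
instance (matris : List String) (out : List (List String)) : Decidable (Spec_convertToFrequency matris out) := by unfold Spec_convertToFrequency; infer_instance

-- ===== CLAIM =====
def Claim_equal_convertToFrequency : Prop := ∀ (matris : List String), Dom_convertToFrequency matris → Spec_convertToFrequency matris (convertToFrequency matris)

-- ===== LEMMAS AND PROOFS =====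

-- A's dedup loop builds the same list as dedup∘filter
lemma fdv_foldl (c : List String) (acc : List String) :
    c.foldl fdvStep acc = (c.filter (fun v => v ≠ "unKnow")).foldl PySem.Set.add acc := by
  induction c generalizing acc with
  | nil => rfl
  | cons x xs ih =>
    simp only [List.foldl_cons, List.filter_cons]
    by_cases hx : x = "unKnow"
    · subst hx
      simp [fdvStep, ih]
    · have hstep : fdvStep acc x = PySem.Set.add acc x := by
        rw [PySem.Set.add_eq_ite]
        by_cases hm : x ∈ acc <;> simp [fdvStep, hm, hx]
      simp [hx, hstep, ih]

lemma fdv_eq (c : List String) :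
    findDifferentValue c = PySem.List.dedup (c.filter (fun v => v ≠ "unKnow")) := by
  unfold findDifferentValue
  rw [PySem.List.foldl_pyRange_zero_pyGetD' c "" fdvStep []]
  rw [fdv_foldl]
  simp [PySem.List.dedup_eq_ofList, PySem.Set.ofList_eq_foldl]

lemma rowA_eq_map (stun : List String) (x : String) :
    rowA stun x = stun.map (fun y => if x = y then "1" else "0") := by
  unfold rowA
  rw [PySem.List.foldl_pyRange_zero_pyGetD' stun "" (rstepA x) []]
  have : ∀ (l : List String) (acc : List String),
      l.foldl (rstepA x) acc = acc ++ l.map (fun y => if x = y then "1" else "0") := by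
    intro l
    induction l with
    | nil => simp
    | cons a as ih =>
      intro acc
      simp only [List.foldl_cons, ih, List.map_cons, rstepA, beq_iff_eq]
      split_ifs <;> simp
  simpa using this stun []

lemma foldl_append_rows {α β : Type} (l : List α) (g : α → β) (init : List β) :
    l.foldl (fun acc v => acc ++ [g v]) init = init ++ l.map g := by
  induction l generalizing init with
  | nil => simp
  | cons a as ih => simp [ih]

-- ===== VERDICT =====
theorem convertToFrequency_spec : Claim_equal_convertToFrequency := by
  intro matris _
  unfold Spec_convertToFrequency convertToFrequency convertToFrequency_alt
  rw [fdv_eq]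
  set header := PySem.List.dedup (matris.filter (fun v => v ≠ "unKnow")) with hh
  rw [PySem.List.foldl_pyRange_zero_pyGetD' matris "" (cstepA header) [header]]
  have : List.foldl (cstepA header) [header] matris = [header] ++ matris.map (rowA header) :=
    foldl_append_rows matris (rowA header) [header]
  rw [this]
  congr 1
  apply List.ext_getElem
  · simp
  · intro i hi1 hi2
    simp only [List.length_map] at hi1
    simp only [List.getElem_map, List.getElem_range]
    rw [rowA_eq_map, List.map_map]
    apply List.map_congr_left
    intro u _
    simp only [Function.comp_apply, List.getD_eq_getElem?_getD, List.getElem?_map,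
      List.getElem?_eq_getElem hi1, Option.map_some, Option.getD_some]
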